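-- pv_equiv track=rewrite | github.com/haolunc/ARC-RL | reference_solutions/solutions/a5313dff.py | transform
-- ===== SOURCE A (Python) =====
-- def transform(grid):
--
--     result = [row[:] for row in grid]
--     h = len(grid)
--     w = len(grid[0]) if h else 0
--
--     def border_is_all_2(t, l, b, r):
--
--         for c in range(l, r + 1):
--             if grid[t][c] != 2 or grid[b][c] != 2:
--                 return False
--
--         for rr in range(t + 1, b):
--             if grid[rr][l] != 2 or grid[rr][r] != 2:
--                 return False
--         return True
--
--     def fill_interior(t, l, b, r):
--         for rr in range(t + 1, b):
--             for cc in range(l + 1, r):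
--                 if result[rr][cc] != 2:
--                     result[rr][cc] = 1
--
--     for top in range(h - 2):
--         for left in range(w - 2):
--             for bottom in range(top + 2, h):
--                 for right in range(left + 2, w):
--                     if border_is_all_2(top, left, bottom, right):
--                         fill_interior(top, left, bottom, right)
--
--     return result
-- ===== SOURCE B (Python) =====
-- def transform(grid):
--     h = len(grid)
--     w = len(grid[0]) if h else 0
--
--     def row_all2(i, l, r):
--         return all(grid[i][c] == 2 for c in range(l, r + 1))
--
--     def col_all2(j, t, b):
--         return all(grid[i][j] == 2 for i in range(t, b + 1))
--
--     rects = [(t, l, b, r)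
--              for t in range(h - 2)
--              for l in range(w - 2)
--              for b in range(t + 2, h)
--              for r in range(l + 2, w)
--              if row_all2(t, l, r) and row_all2(b, l, r)
--              and col_all2(l, t + 1, b - 1) and col_all2(r, t + 1, b - 1)]
--
--     def inside(i, j):
--         return any(t < i < b and l < j < r for (t, l, b, r) in rects)
--
--     return [[1 if v != 2 and inside(i, j) else v for j, v in enumerate(row)]
--             for i, row in enumerate(grid)]
-- ===== Notes on version B (the rewrite author's own statement) =====
-- stated objective: alternative
-- what changed: B first collects the list of all 2-bordered rectangles (testing borders by row/column segments), then builds the output grid in one functional per-cell pass that marks a cell 1 iff it is non-2 and strictly inside some collected rectangle, instead of A's in-place repeated interior fills interleaved into the quadruple rectangle loop.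
import Mathlib
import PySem

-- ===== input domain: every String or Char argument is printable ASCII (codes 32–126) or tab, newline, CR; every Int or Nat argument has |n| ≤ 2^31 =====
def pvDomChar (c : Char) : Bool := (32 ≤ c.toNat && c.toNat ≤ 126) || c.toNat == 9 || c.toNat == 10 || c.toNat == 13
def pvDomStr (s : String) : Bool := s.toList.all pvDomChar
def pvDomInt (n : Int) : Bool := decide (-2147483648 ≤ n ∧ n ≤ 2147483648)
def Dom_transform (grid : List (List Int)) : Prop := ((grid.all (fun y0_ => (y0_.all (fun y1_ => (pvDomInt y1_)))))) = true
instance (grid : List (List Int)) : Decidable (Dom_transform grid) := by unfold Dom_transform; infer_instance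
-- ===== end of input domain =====

-- B replaces A's in-place interior filling inside the quadruple rectangle loop by a two-phase
-- program: collect all 2-bordered rectangles, then one functional per-cell pass (objective: alternative).

-- ===== PORT A =====
-- grid[i][j]: every index fed to this helper by either port is nonnegative, where it is Python-exact
def pvCell (m : List (List Int)) (i j : Int) : Int :=
  (m.getD i.toNat []).getD j.toNat 0

-- result[i][j] = v: indices used are nonnegative and within range inside Pre_, where this is Python's item assignment
def setCell (m : List (List Int)) (i j : Int) (v : Int) : List (List Int) :=
  m.set i.toNat ((m.getD i.toNat []).set j.toNat v)

def borderIsAll2 (grid : List (List Int)) (t l b r : Int) : Bool :=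
  ((PySem.List.pyRange l (r + 1) 1).all fun c => pvCell grid t c == 2 && pvCell grid b c == 2) &&
  ((PySem.List.pyRange (t + 1) b 1).all fun rr => pvCell grid rr l == 2 && pvCell grid rr r == 2)

def fillInterior (res : List (List Int)) (t l b r : Int) : List (List Int) :=
  (PySem.List.pyRange (t + 1) b 1).foldl (fun res2 rr =>
    (PySem.List.pyRange (l + 1) r 1).foldl (fun res3 cc =>
      if pvCell res3 rr cc != 2 then setCell res3 rr cc 1 else res3) res2) res

def transform (grid : List (List Int)) : List (List Int) :=
  let h : Int := grid.length
  let w : Int := if h ≠ 0 then ((grid.headD []).length : Int) else 0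
  (PySem.List.pyRange 0 (h - 2) 1).foldl (fun res top =>
    (PySem.List.pyRange 0 (w - 2) 1).foldl (fun res left =>
      (PySem.List.pyRange (top + 2) h 1).foldl (fun res bottom =>
        (PySem.List.pyRange (left + 2) w 1).foldl (fun res right =>
          if borderIsAll2 grid top left bottom right then fillInterior res top left bottom right
          else res) res) res) res) grid

-- ===== PORT B =====
def rowAll2 (grid : List (List Int)) (i l r : Int) : Bool :=
  (PySem.List.pyRange l (r + 1) 1).all fun c => pvCell grid i c == 2

def colAll2 (grid : List (List Int)) (j t b : Int) : Bool :=
  (PySem.List.pyRange t (b + 1) 1).all fun i => pvCell grid i j == 2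

def bordered (grid : List (List Int)) (t l b r : Int) : Bool :=
  rowAll2 grid t l r && rowAll2 grid b l r &&
  colAll2 grid l (t + 1) (b - 1) && colAll2 grid r (t + 1) (b - 1)

def bRects (grid : List (List Int)) : List (Int × Int × Int × Int) :=
  let h : Int := grid.length
  let w : Int := if h ≠ 0 then ((grid.headD []).length : Int) else 0
  (PySem.List.pyRange 0 (h - 2) 1).flatMap fun t =>
    (PySem.List.pyRange 0 (w - 2) 1).flatMap fun l =>
      (PySem.List.pyRange (t + 2) h 1).flatMap fun b =>
        ((PySem.List.pyRange (l + 2) w 1).filter fun r => bordered grid t l b r).map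
          fun r => (t, l, b, r)

def insideAny (rects : List (Int × Int × Int × Int)) (i j : Int) : Bool :=
  rects.any fun q => q.1 < i && i < q.2.2.1 && q.2.1 < j && j < q.2.2.2

def transform_alt (grid : List (List Int)) : List (List Int) :=
  let rects := bRects grid
  (PySem.List.enumerate grid 0).map fun p =>
    (PySem.List.enumerate p.2 0).map fun q =>
      if q.2 != 2 && insideAny rects p.1 q.1 then 1 else q.2

-- ===== PRECONDITION & SPEC =====
-- Pre_ excludes ragged grids with at least 3 rows and a first row of width at least 3 in which
-- some row is shorter than the first: there both Pythons' border scans can raise IndexError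
-- (they read grid[i][c] for c < len(grid[0])), and when a non-2 short-circuits the scan before
-- the missing cell, A returning at all is an accident of the scan order.
def Pre_transform (grid : List (List Int)) : Prop :=
  grid.length < 3 ∨ (grid.headD []).length < 3 ∨
    ∀ row ∈ grid, (grid.headD []).length ≤ row.length
instance (grid : List (List Int)) : Decidable (Pre_transform grid) := by
  unfold Pre_transform; infer_instance

def pvWitness_transform : List (List Int) := [[2, 2, 2], [2, 0, 2], [2, 2, 2]]

def Spec_transform (grid : List (List Int)) (out : List (List Int)) : Prop := out = transform_alt grid
instance (grid : List (List Int)) (out : List (List Int)) : Decidable (Spec_transform grid out) := by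
  unfold Spec_transform; infer_instance

-- ===== CLAIM (what is proved, stated in full; the proofs are below) =====
def Claim_equal_transform : Prop :=
  ∀ (grid : List (List Int)), Dom_transform grid → Pre_transform grid →
    Spec_transform grid (transform grid)

-- ===== LEMMAS AND PROOFS =====

-- B's result as a function of an arbitrary rectangle list
def markAll (grid : List (List Int)) (R : List (Int × Int × Int × Int)) : List (List Int) :=
  (PySem.List.enumerate grid 0).map fun p =>
    (PySem.List.enumerate p.2 0).map fun q =>
      if q.2 != 2 && insideAny R p.1 q.1 then 1 else q.2

-- the marked row of a single rectangle's interior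
def rowFill (row : List Int) (l r : Int) : List Int :=
  (PySem.List.enumerate row 0).map fun q =>
    if l < q.1 && q.1 < r && q.2 != 2 then 1 else q.2

-- one cell update of the inner fill loop, on the row alone
def cellUpd (row : List Int) (cc : Int) : List Int :=
  if row.getD cc.toNat 0 != 2 then row.set cc.toNat 1 else row

lemma all_and_split (l : List Int) (p q : Int → Bool) :
    (l.all fun x => p x && q x) = (l.all p && l.all q) := by
  induction l with
  | nil => rfl
  | cons a t ih => simp only [List.all_cons, ih]; cases p a <;> cases q a <;> simp

lemma border_eq (grid : List (List Int)) (t l b r : Int) :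
    borderIsAll2 grid t l b r = bordered grid t l b r := by
  unfold borderIsAll2 bordered rowAll2 colAll2
  have hb : b - 1 + 1 = b := by ring
  rw [hb, all_and_split, all_and_split]
  simp [Bool.and_assoc]

lemma markAll_nil (grid : List (List Int)) : markAll grid [] = grid := by
  simp [markAll, insideAny, PySem.List.map_snd_enumerate]

lemma enum_fst {α : Type} (xs : List α) (k : Nat) (h : k < (PySem.List.enumerate xs 0).length) :
    ((PySem.List.enumerate xs 0)[k]).1 = (k : Int) := by
  simp [PySem.List.enumerate_eq_zipIdx_map, List.getElem_zipIdx]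

lemma enum_snd {α : Type} (xs : List α) (k : Nat) (h : k < (PySem.List.enumerate xs 0).length) :
    ((PySem.List.enumerate xs 0)[k]).2 = xs[k]'(by simpa [PySem.List.length_enumerate] using h) := by
  simp [PySem.List.enumerate_eq_zipIdx_map, List.getElem_zipIdx]

lemma markAll_length (grid : List (List Int)) (R : List (Int × Int × Int × Int)) :
    (markAll grid R).length = grid.length := by
  simp [markAll, PySem.List.length_enumerate]

lemma markAll_row_length (grid : List (List Int)) (R : List (Int × Int × Int × Int))
    (i : Nat) (hi : i < grid.length) :
    ((markAll grid R)[i]'(by rw [markAll_length]; exact hi)).length = grid[i].length := by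
  simp [markAll, enum_fst, enum_snd]

lemma markAll_getElem (grid : List (List Int)) (R : List (Int × Int × Int × Int))
    (i j : Nat) (hi : i < grid.length) (hj : j < grid[i].length) :
    ((markAll grid R)[i]'(by rw [markAll_length]; exact hi))[j]'(by rw [markAll_row_length grid R i hi]; exact hj) =
      if grid[i][j] != 2 && insideAny R (i : Int) (j : Int) then 1 else grid[i][j] := by
  simp [markAll, enum_fst, enum_snd]

lemma rowFill_length (row : List Int) (l r : Int) : (rowFill row l r).length = row.length := by
  simp [rowFill, PySem.List.length_enumerate]

lemma rowFill_getElem (row : List Int) (l r : Int) (j : Nat) (hj : j < row.length) :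
    (rowFill row l r)[j]'(by rw [rowFill_length]; exact hj) =
      if l < (j : Int) && (j : Int) < r && row[j] != 2 then 1 else row[j] := by
  simp [rowFill, enum_fst, enum_snd]

lemma rowFill_idem (row : List Int) (l r : Int) :
    rowFill (rowFill row l r) l r = rowFill row l r := by
  apply List.ext_getElem
  · simp [rowFill_length]
  · intro j h1 h2
    have hj : j < row.length := by simpa [rowFill_length] using h2
    rw [rowFill_getElem (rowFill row l r) l r j (by simpa [rowFill_length] using hj),
      rowFill_getElem row l r j hj]
    cases hA : decide (l < (j : Int)) <;> cases hB : decide ((j : Int) < r) <;>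
      cases hC : (row[j] != 2) <;> simp [*]

lemma cellUpd_length (row : List Int) (cc : Int) : (cellUpd row cc).length = row.length := by
  unfold cellUpd; split <;> simp

-- the inner cc-fold on a single row
lemma cellUpd_fold_length (cs : List Int) (row : List Int) :
    (cs.foldl cellUpd row).length = row.length := by
  induction cs generalizing row with
  | nil => rfl
  | cons c cs ih => rw [List.foldl_cons, ih, cellUpd_length]

lemma cellUpd_fold_getElem (cs : List Int) (row : List Int) (j : Nat) (hj : j < row.length)
    (h0 : ∀ c ∈ cs, 0 ≤ c) :
    (cs.foldl cellUpd row)[j]'(by rw [cellUpd_fold_length]; exact hj) =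
      if ((j : Int) ∈ cs : Bool) && row[j] != 2 then 1 else row[j] := by
  induction cs generalizing row with
  | nil => simp
  | cons c cs ih =>
    have h0c : 0 ≤ c := h0 c List.mem_cons_self
    simp only [List.foldl_cons]
    rw [ih (cellUpd row c) (by simpa [cellUpd_length] using hj) (fun x hx => h0 x (List.mem_cons_of_mem _ hx))]
    by_cases hcj : c = (j : Int)
    · subst hcj
      have hcn : (j : Int).toNat = j := by omega
      unfold cellUpd
      have hq : row[j]? = some row[j] := List.getElem?_eq_getElem hj
      simp only [hcn]
      by_cases h2 : row[j] = 2
      · simp [hq, h2]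
      · have hset : (row.set j 1)[j]'(by simpa using hj) = 1 :=
          List.getElem_set_self (by simpa using hj)
        simp [hq, h2, hset]
    · have hne : c.toNat ≠ j := by omega
      have hgj : (cellUpd row c)[j]'(by simpa [cellUpd_length] using hj) = row[j] := by
        unfold cellUpd; split
        · exact List.getElem_set_ne hne (by simpa using hj)
        · rfl
      simp [hgj, List.mem_cons, Ne.symm hcj]

lemma cellUpd_fold_eq_rowFill (row : List Int) (l r : Int) (hl : -1 ≤ l) :
    (PySem.List.pyRange (l + 1) r 1).foldl cellUpd row = rowFill row l r := by
  apply List.ext_getElem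
  · simp [cellUpd_fold_length, rowFill_length]
  · intro j h1 h2
    have hj : j < row.length := by simpa [cellUpd_fold_length] using h1
    rw [cellUpd_fold_getElem _ row j hj
        (fun c hc => by have := (PySem.List.mem_pyRange_one).1 hc; omega),
      rowFill_getElem row l r j hj]
    have hmem : ((j : Int) ∈ PySem.List.pyRange (l + 1) r 1) ↔ (l < (j : Int) ∧ (j : Int) < r) := by
      rw [PySem.List.mem_pyRange_one]; omega
    simp [hmem, Bool.and_assoc]

lemma set_getD_self {α : Type} (m : List α) (k : Nat) (d : α) : m.set k (m.getD k d) = m := by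
  by_cases hk : k < m.length
  · rw [List.getD_eq_getElem _ d hk]; exact List.set_getElem_self hk
  · exact List.set_eq_of_length_le (by omega)

-- lifting a one-row operation through the matrix
lemma foldl_set_single (cs : List Int) (k : Nat) (g : List Int → Int → List Int)
    (res : List (List Int)) :
    cs.foldl (fun m c => m.set k (g (m.getD k []) c)) res
      = res.set k (cs.foldl g (res.getD k [])) := by
  induction cs generalizing res with
  | nil => simp only [List.foldl_nil]; exact (set_getD_self res k []).symm
  | cons c cs ih =>
    rw [List.foldl_cons, List.foldl_cons, ih]
    by_cases hk : k < res.length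
    · have hget : (res.set k (g (res.getD k []) c)).getD k [] = g (res.getD k []) c := by
        rw [List.getD_eq_getElem _ [] (by simpa using hk)]
        exact List.getElem_set_self (by simpa using hk)
      rw [hget, List.set_set]
    · have hlen : res.length ≤ k := by omega
      rw [List.set_eq_of_length_le hlen, List.set_eq_of_length_le hlen,
        List.set_eq_of_length_le (by simpa [List.set_eq_of_length_le hlen] using hlen)]

lemma inner_fold_eq (res : List (List Int)) (rr l r : Int) (hl : -1 ≤ l) :
    (PySem.List.pyRange (l + 1) r 1).foldl (fun res3 cc =>
        if pvCell res3 rr cc != 2 then setCell res3 rr cc 1 else res3) res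
      = res.set rr.toNat (rowFill (res.getD rr.toNat []) l r) := by
  have hstep : (fun (m : List (List Int)) (cc : Int) =>
      if pvCell m rr cc != 2 then setCell m rr cc 1 else m)
      = fun m cc => m.set rr.toNat (cellUpd (m.getD rr.toNat []) cc) := by
    funext m cc
    unfold pvCell setCell cellUpd
    by_cases h : ((m.getD rr.toNat []).getD cc.toNat 0 != 2) = true
    · rw [if_pos h, if_pos h]
    · rw [if_neg h, if_neg h]
      exact (set_getD_self m rr.toNat []).symm
  rw [hstep, foldl_set_single, cellUpd_fold_eq_rowFill _ _ _ hl]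

lemma outer_fold_length (rs : List Int) (l r : Int) (res : List (List Int)) :
    (rs.foldl (fun m rr => m.set rr.toNat (rowFill (m.getD rr.toNat []) l r)) res).length
      = res.length := by
  induction rs generalizing res with
  | nil => rfl
  | cons rr rs ih => rw [List.foldl_cons, ih, List.length_set]

lemma outer_fold_getElem (rs : List Int) (l r : Int) (res : List (List Int)) (i : Nat)
    (hi : i < res.length) (h0 : ∀ x ∈ rs, 0 ≤ x) :
    (rs.foldl (fun m rr => m.set rr.toNat (rowFill (m.getD rr.toNat []) l r)) res)[i]'(by
        rw [outer_fold_length]; exact hi) =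
      if ((i : Int) ∈ rs : Bool) then rowFill res[i] l r else res[i] := by
  induction rs generalizing res with
  | nil => simp
  | cons rr rs ih =>
    simp only [List.foldl_cons]
    rw [ih (res.set rr.toNat (rowFill (res.getD rr.toNat []) l r)) (by simpa using hi)
      (fun x hx => h0 x (List.mem_cons_of_mem _ hx))]
    by_cases hri : rr = (i : Int)
    · subst hri
      have hcn : ((i : Int)).toNat = i := by omega
      have hq : res[i]? = some res[i] := List.getElem?_eq_getElem hi
      have hgd : res.getD i [] = res[i] := List.getD_eq_getElem res [] hi
      simp only [hcn, hgd]
      by_cases hm : (i : Int) ∈ rs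
      · simp [hm, rowFill_idem]
      · simp [hm]
    · have hne : rr.toNat ≠ i := by
        have := h0 rr List.mem_cons_self; omega
      have hg : (res.set rr.toNat (rowFill (res.getD rr.toNat []) l r))[i]'(by simpa using hi)
          = res[i] := List.getElem_set_ne hne (by simpa using hi)
      simp only [List.getD_eq_getElem?_getD] at hg
      simp [hg, List.mem_cons, Ne.symm hri]

lemma fillInterior_eq_markAll (grid : List (List Int)) (R : List (Int × Int × Int × Int))
    (t l b r : Int) (ht : 0 ≤ t) (hl : 0 ≤ l) :
    fillInterior (markAll grid R) t l b r = markAll grid (R ++ [(t, l, b, r)]) := by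
  unfold fillInterior
  have hstep : (fun (res2 : List (List Int)) (rr : Int) =>
      (PySem.List.pyRange (l + 1) r 1).foldl (fun res3 cc =>
        if pvCell res3 rr cc != 2 then setCell res3 rr cc 1 else res3) res2)
      = fun m rr => m.set rr.toNat (rowFill (m.getD rr.toNat []) l r) :=
    funext fun m => funext fun rr => inner_fold_eq m rr l r (by omega)
  rw [hstep]
  have hnn : ∀ x ∈ PySem.List.pyRange (t + 1) b 1, 0 ≤ x := fun x hx => by
    have := PySem.List.mem_pyRange_one.1 hx; omega
  apply List.ext_getElem
  · rw [outer_fold_length, markAll_length, markAll_length]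
  · intro i h1 h2
    have hgl : i < grid.length := by
      rw [outer_fold_length, markAll_length] at h1; exact h1
    rw [outer_fold_getElem _ l r _ i (by rw [markAll_length]; exact hgl) hnn]
    by_cases hm : (i : Int) ∈ PySem.List.pyRange (t + 1) b 1
    · have hmi : t < (i : Int) ∧ (i : Int) < b := by
        have := PySem.List.mem_pyRange_one.1 hm; omega
      rw [if_pos (by simpa using hm)]
      apply List.ext_getElem
      · rw [rowFill_length, markAll_row_length grid R i hgl, markAll_row_length grid _ i hgl]
      · intro j hj1 hj2
        have hjg : j < grid[i].length := by
          rw [rowFill_length, markAll_row_length] at hj1; exact hj1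
        rw [rowFill_getElem _ l r j (by rw [markAll_row_length]; exact hjg),
          markAll_getElem grid R i j hgl hjg,
          markAll_getElem grid (R ++ [(t, l, b, r)]) i j hgl hjg]
        simp only [insideAny, List.any_append, List.any_cons, List.any_nil, Bool.or_false]
        by_cases hIR : (R.any fun q => q.1 < (i : Int) && (i : Int) < q.2.2.1 &&
            q.2.1 < (j : Int) && (j : Int) < q.2.2.2) = true <;>
          by_cases hg2 : grid[i][j] = 2 <;> by_cases hlj : l < (j : Int) <;>
          by_cases hjr2 : (j : Int) < r <;>
          simp [hIR, hg2, hlj, hjr2, hmi.1, hmi.2]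
    · have hmi : ¬(t < (i : Int) ∧ (i : Int) < b) := by
        rw [PySem.List.mem_pyRange_one] at hm; omega
      rw [if_neg (by simpa using hm)]
      apply List.ext_getElem
      · rw [markAll_row_length grid R i hgl, markAll_row_length grid _ i hgl]
      · intro j hj1 hj2
        have hjg : j < grid[i].length := by
          rw [markAll_row_length] at hj1; exact hj1
        rw [markAll_getElem grid R i j hgl hjg,
          markAll_getElem grid (R ++ [(t, l, b, r)]) i j hgl hjg]
        simp only [insideAny, List.any_append, List.any_cons, List.any_nil, Bool.or_false]
        by_cases h1 : t < (i : Int)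
        · have h2 : ¬((i : Int) < b) := fun hh => hmi ⟨h1, hh⟩
          simp only [h2, decide_false, Bool.false_and, Bool.and_false, Bool.or_false]
          rfl
        · simp only [h1, decide_false, Bool.false_and, Bool.or_false]
          rfl

lemma foldl_fill_markAll (grid : List (List Int)) (L R : List (Int × Int × Int × Int))
    (hL : ∀ q ∈ L, 0 ≤ q.1 ∧ 0 ≤ q.2.1) :
    L.foldl (fun res q => fillInterior res q.1 q.2.1 q.2.2.1 q.2.2.2) (markAll grid R)
      = markAll grid (R ++ L) := by
  induction L generalizing R with
  | nil => simp
  | cons q L ih =>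
    obtain ⟨t, l, b, r⟩ := q
    rw [List.foldl_cons]
    have hq := hL _ List.mem_cons_self
    simp only at hq ⊢
    rw [fillInterior_eq_markAll grid R t l b r hq.1 hq.2,
      ih (R ++ [(t, l, b, r)]) (fun q hq => hL q (List.mem_cons_of_mem _ hq))]
    simp

lemma bRects_nonneg (grid : List (List Int)) :
    ∀ q ∈ bRects grid, 0 ≤ q.1 ∧ 0 ≤ q.2.1 := by
  intro q hq
  simp only [bRects, List.mem_flatMap, List.mem_map, List.mem_filter,
    PySem.List.mem_pyRange_one] at hq
  obtain ⟨t, ht, l, hl, b, hb, r, hr, rfl⟩ := hq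
  refine ⟨?_, ?_⟩ <;> simp <;> omega

lemma transform_eq_foldl (grid : List (List Int)) :
    transform grid = (bRects grid).foldl
      (fun res q => fillInterior res q.1 q.2.1 q.2.2.1 q.2.2.2) grid := by
  unfold transform bRects
  simp only [List.foldl_flatMap]
  apply PySem.List.foldl_congr_mem
  intro res top _
  apply PySem.List.foldl_congr_mem
  intro res2 left _
  apply PySem.List.foldl_congr_mem
  intro res3 bottom _
  rw [List.foldl_map]
  simp only [border_eq]
  rw [← PySem.List.foldl_if_eq_foldl_filter]

-- ===== VERDICT (by name: the statement is the Claim_ definition above) =====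
theorem transform_spec : Claim_equal_transform := by
  intro grid _ _
  show transform grid = transform_alt grid
  have h1 : transform_alt grid = markAll grid (bRects grid) := rfl
  rw [h1, transform_eq_foldl]
  have h2 := foldl_fill_markAll grid (bRects grid) [] (bRects_nonneg grid)
  rw [markAll_nil] at h2
  simpa using h2
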